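-- pv_equiv track=rewrite | github.com/cxxxtxxyxx/Algorithm | 프로그래머스/unrated/135808. 과일 장수/과일 장수.py | solution
-- ===== SOURCE A (Python) =====
-- def solution(k, m, score):
--     answer = 0
--
--     if m > len(score):
--         return 0
--
--     score.sort()
--
--     score = score[len(score) % m:]
--     for i in range(0, len(score), m):
--         answer += score[i] * m
--     return answer
-- ===== SOURCE B (Python) =====
-- def solution(k, m, score):
--     n = len(score)
--     if m <= 0 or m > n:
--         return 0
--     counts = {}
--     for s in score:
--         counts[s] = counts.get(s, 0) + 1
--     limit = (n // m) * m
--     answer = 0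
--     cum = 0
--     for v in sorted(counts, reverse=True):
--         prev = cum
--         cum += counts[v]
--         hi = min(cum, limit)
--         num = hi // m - prev // m
--         if num > 0:
--             answer += v * num * m
--     return answer
-- ===== Notes on version B (the rewrite author's own statement) =====
-- stated objective: alternative
-- what changed: B replaces A's full sort + slice + per-box index loop by a dict frequency count and a single walk over the sorted DISTINCT values in descending order, computing each value's contribution of box minima with floor-division interval arithmetic.
import Mathlib
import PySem

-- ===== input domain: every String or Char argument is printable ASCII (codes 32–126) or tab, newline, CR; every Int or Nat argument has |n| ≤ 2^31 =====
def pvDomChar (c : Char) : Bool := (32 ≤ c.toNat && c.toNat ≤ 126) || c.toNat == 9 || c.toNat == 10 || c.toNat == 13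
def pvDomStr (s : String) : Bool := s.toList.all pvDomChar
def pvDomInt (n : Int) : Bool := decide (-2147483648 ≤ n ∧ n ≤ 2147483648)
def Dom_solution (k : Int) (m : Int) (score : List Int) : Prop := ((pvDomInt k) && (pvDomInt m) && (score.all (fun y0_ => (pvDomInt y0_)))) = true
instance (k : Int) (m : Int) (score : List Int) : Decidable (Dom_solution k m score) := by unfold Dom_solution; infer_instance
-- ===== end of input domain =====

-- B counts frequencies in a dict and walks the sorted DISTINCT values once instead of A's full sort +
-- per-box index loop (alternative algorithm). Python A sorts `score` in place (an observable mutation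
-- B does not perform); the equivalence proved here is about the return value only.

-- ===== PORT A =====
def solution (k : Int) (m : Int) (score : List Int) : Int :=
  if m > (score.length : Int) then 0
  else
    let s1 := PySem.List.sorted score (fun x => x)
    let s2 := PySem.List.slice s1 (some (PySem.Int.mod (s1.length : Int) m))
    (PySem.List.pyRange 0 (s2.length : Int) m).foldl
      (fun answer i => answer + (PySem.List.pyGetD s2 i 0) * m) 0

-- ===== PORT B =====
def solution_alt (k : Int) (m : Int) (score : List Int) : Int :=
  let n : Int := (score.length : Int)
  if m ≤ 0 ∨ m > n then 0
  else
    let counts := score.foldl (fun d s => d.insert s (d.getD s 0 + 1)) PySem.Dict.empty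
    let limit := PySem.Int.floordiv n m * m
    ((PySem.List.sorted counts.keys (fun v => v) true).foldl
      (fun acc v =>
        let prev := acc.2
        let cum := prev + counts.getD v 0
        let hi := min cum limit
        let num := PySem.Int.floordiv hi m - PySem.Int.floordiv prev m
        (if 0 < num then acc.1 + v * num * m else acc.1, cum))
      (0, 0)).1

-- ===== PRECONDITION & SPEC =====
-- Pre_ excludes exactly m = 0, the only inputs on which A raises (ZeroDivisionError at `len(score) % m`).
def Pre_solution (k : Int) (m : Int) (score : List Int) : Prop := m ≠ 0
instance (k : Int) (m : Int) (score : List Int) : Decidable (Pre_solution k m score) := by unfold Pre_solution; infer_instance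
def pvWitness_solution : Int × Int × List Int := (4, 2, [3, 1, 2, 1])

def Spec_solution (k : Int) (m : Int) (score : List Int) (out : Int) : Prop := out = solution_alt k m score
instance (k : Int) (m : Int) (score : List Int) (out : Int) : Decidable (Spec_solution k m score out) := by unfold Spec_solution; infer_instance

-- ===== CLAIM (what is proved, stated in full; the proofs are below) =====
def Claim_equal_solution : Prop := ∀ (k : Int) (m : Int) (score : List Int), Dom_solution k m score → Pre_solution k m score → Spec_solution k m score (solution k m score)

-- ===== LEMMAS AND PROOFS =====

-- the multiset of `score` laid out as the runs of the distinct values `vs` (proof device)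
def pvRun (cnt : Int → Nat) (vs : List Int) : List Int := vs.flatMap (fun v => List.replicate (cnt v) v)

-- B's loop body, with the counter dict replaced by an abstract count function
def pvStep (cnt : Int → Nat) (M L : Nat) (acc : Int × Int) (v : Int) : Int × Int :=
  let prev := acc.2
  let cum := prev + (cnt v : Int)
  let hi := min cum (L : Int)
  let num := PySem.Int.floordiv hi (M : Int) - PySem.Int.floordiv prev (M : Int)
  (if 0 < num then acc.1 + v * num * (M : Int) else acc.1, cum)

lemma pvImage (B M : Nat) (hM : 0 < M) :
    (Finset.Ioc 0 (B * M)).filter (M ∣ ·) = (Finset.range B).image (fun j => (j + 1) * M) := by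
  ext p
  simp only [Finset.mem_filter, Finset.mem_Ioc, Finset.mem_image, Finset.mem_range]
  constructor
  · rintro ⟨⟨hp0, hpB⟩, q, rfl⟩
    have hq1 : 1 ≤ q := by
      rcases Nat.eq_zero_or_pos q with h | h
      · subst h; omega
      · exact h
    have hqB : q ≤ B := by
      have : M * q ≤ M * B := by rw [Nat.mul_comm M B]; exact hpB
      exact Nat.le_of_mul_le_mul_left this hM
    refine ⟨q - 1, by omega, ?_⟩
    rw [Nat.sub_add_cancel hq1, Nat.mul_comm]
  · rintro ⟨j, hj, rfl⟩
    refine ⟨⟨?_, ?_⟩, j + 1, by ring⟩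
    · positivity
    · exact Nat.mul_le_mul_right M hj

lemma pvRun_count (cnt : Int → Nat) (vs : List Int) (hnd : vs.Nodup) (x : Int) :
    (vs.flatMap (fun v => List.replicate (cnt v) v)).count x = if x ∈ vs then cnt x else 0 := by
  induction vs with
  | nil => simp
  | cons v vs ih =>
    simp only [List.flatMap_cons, List.count_append, List.count_replicate]
    rw [ih hnd.of_cons]
    by_cases hx : x = v
    · subst hx
      have hnm : x ∉ vs := (List.nodup_cons.mp hnd).1
      simp [hnm]
    · simp only [List.mem_cons]
      have : (v == x) = false := by simp [Ne.symm hx]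
      simp [this, hx]

lemma pvRun_pairwise (cnt : Int → Nat) (vs : List Int)
    (h : vs.Pairwise (fun a b => b ≤ a)) :
    (vs.flatMap (fun v => List.replicate (cnt v) v)).Pairwise (fun a b => b ≤ a) := by
  induction vs with
  | nil => simp
  | cons v vs ih =>
    simp only [List.flatMap_cons]
    rw [List.pairwise_append]
    refine ⟨?_, ih h.of_cons, ?_⟩
    · rw [List.pairwise_replicate]; right; exact le_refl v
    · intro a ha b hb
      rw [List.eq_of_mem_replicate ha]
      rw [List.mem_flatMap] at hb
      obtain ⟨w, hw, hbw⟩ := hb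
      rw [List.eq_of_mem_replicate hbw]
      exact List.rel_of_pairwise_cons h hw

lemma pvCard (M a b : Nat) (hab : a ≤ b) :
    ((Finset.Ioc a b).filter (M ∣ ·)).card = b / M - a / M := by
  have hu : ((Finset.Ioc 0 a).filter (M ∣ ·)) ∪ ((Finset.Ioc a b).filter (M ∣ ·))
      = (Finset.Ioc 0 b).filter (M ∣ ·) := by
    rw [← Finset.filter_union, Finset.Ioc_union_Ioc_eq_Ioc (Nat.zero_le a) hab]
  have hd : Disjoint ((Finset.Ioc 0 a).filter (M ∣ ·)) ((Finset.Ioc a b).filter (M ∣ ·)) := by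
    rw [Finset.disjoint_left]
    intro p hp hq
    simp only [Finset.mem_filter, Finset.mem_Ioc] at hp hq
    omega
  have hc := Finset.card_union_of_disjoint hd
  rw [hu] at hc
  rw [Nat.Ioc_filter_dvd_card_eq_div, Nat.Ioc_filter_dvd_card_eq_div] at hc
  have h1 : a / M ≤ b / M := Nat.div_le_div_right hab
  omega

lemma pvLower (M : Nat) (c : Nat) (v : Int) (w : List Int) (c0 mid : Nat)
    (h1 : c0 ≤ mid) (h2 : mid ≤ c0 + c) :
    (∑ p ∈ Finset.Ioc c0 mid,
      if M ∣ p then (List.replicate c v ++ w).getD (p - c0 - 1) 0 * (M : Int) else 0)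
    = ((mid / M - c0 / M : Nat) : Int) * (v * (M : Int)) := by
  have hcong : ∀ p ∈ Finset.Ioc c0 mid,
      (if M ∣ p then (List.replicate c v ++ w).getD (p - c0 - 1) 0 * (M : Int) else 0)
      = (if M ∣ p then v * (M : Int) else 0) := by
    intro p hp
    simp only [Finset.mem_Ioc] at hp
    have hlt : p - c0 - 1 < c := by omega
    rw [List.getD_append _ _ _ _ (by simpa using hlt), List.getD_replicate _ hlt]
  rw [Finset.sum_congr rfl hcong, ← Finset.sum_filter, Finset.sum_const, pvCard M c0 mid h1,
    nsmul_eq_mul]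

lemma pvRunWalk (M L : Nat) (cnt : Int → Nat) :
    ∀ (vs : List Int) (c0 : Nat) (a : Int),
    (vs.foldl (pvStep cnt M L) (a, (c0 : Int))).1
      = a + ∑ p ∈ (Finset.Ioc c0 (min (c0 + (pvRun cnt vs).length) L)).filter (M ∣ ·),
          (pvRun cnt vs).getD (p - c0 - 1) 0 * (M : Int) := by
  intro vs
  induction vs with
  | nil =>
    intro c0 a
    have he : Finset.Ioc c0 (min (c0 + (pvRun cnt []).length) L) = ∅ :=
      Finset.Ioc_eq_empty (by simp [pvRun])
    rw [he]
    simp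
  | cons v vs ih =>
    intro c0 a
    rw [List.foldl_cons]
    have hstep : pvStep cnt M L (a, (c0 : Int)) v =
        ((if 0 < (((min (c0 + cnt v) L / M : Nat) : Int) - ((c0 / M : Nat) : Int)) then
            a + v * (((min (c0 + cnt v) L / M : Nat) : Int) - ((c0 / M : Nat) : Int)) * (M : Int)
          else a), ((c0 + cnt v : Nat) : Int)) := by
      unfold pvStep
      simp only [← Nat.cast_add, ← Nat.cast_min, PySem.Int.floordiv_natCast]
    rw [hstep, ih (c0 + cnt v)]
    have hrun : pvRun cnt (v :: vs) = List.replicate (cnt v) v ++ pvRun cnt vs := by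
      simp [pvRun]
    rw [hrun]
    set c := cnt v with hc
    set len' := (pvRun cnt vs).length with hlen'
    have hlenapp : (List.replicate c v ++ pvRun cnt vs).length = c + len' := by
      simp [hlen']
    rw [hlenapp, Finset.sum_filter, Finset.sum_filter]
    by_cases hL : L ≤ c0
    · have e1 : Finset.Ioc (c0 + c) (min (c0 + c + len') L) = ∅ :=
        Finset.Ioc_eq_empty (by omega)
      have e2 : Finset.Ioc c0 (min (c0 + (c + len')) L) = ∅ :=
        Finset.Ioc_eq_empty (by omega)
      rw [e1, e2]
      have hdle : min (c0 + c) L / M ≤ c0 / M := Nat.div_le_div_right (by omega)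
      rw [if_neg (by omega)]
      simp
    · by_cases h2 : c0 + c ≤ L
      · have hmid : min (c0 + c) L = c0 + c := min_eq_left h2
        have hXeq : c0 + (c + len') = c0 + c + len' := by omega
        rw [hXeq]
        rw [← Finset.sum_Ioc_consecutive _ (show c0 ≤ c0 + c by omega)
              (show c0 + c ≤ min (c0 + c + len') L by omega)]
        rw [pvLower M c v (pvRun cnt vs) c0 (c0 + c) (by omega) (by omega)]
        have hupper : (∑ p ∈ Finset.Ioc (c0 + c) (min (c0 + c + len') L),
              if M ∣ p then (List.replicate c v ++ pvRun cnt vs).getD (p - c0 - 1) 0 * (M : Int) else 0)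
            = ∑ p ∈ Finset.Ioc (c0 + c) (min (c0 + c + len') L),
              if M ∣ p then (pvRun cnt vs).getD (p - (c0 + c) - 1) 0 * (M : Int) else 0 := by
          refine Finset.sum_congr rfl ?_
          intro p hp
          simp only [Finset.mem_Ioc] at hp
          rw [List.getD_append_right _ _ _ _ (by simp; omega)]
          rw [show p - c0 - 1 - (List.replicate c v).length = p - (c0 + c) - 1 by simp; omega]
        rw [hupper, hmid]
        by_cases hdvd : c0 / M < (c0 + c) / M
        · rw [if_pos (by omega)]
          have hsub : ((c0 + c) / M - c0 / M : Nat) = ((c0 + c) / M) - (c0 / M) := rfl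
          have hle : c0 / M ≤ (c0 + c) / M := by omega
          push_cast [Nat.cast_sub hle]
          ring
        · rw [if_neg (by omega)]
          have : (c0 + c) / M - c0 / M = 0 := by omega
          rw [this]
          push_cast
          ring
      · have hmid : min (c0 + c) L = L := min_eq_right (by omega)
        have hX1 : min (c0 + c + len') L = L := min_eq_right (by omega)
        have hX2 : min (c0 + (c + len')) L = L := min_eq_right (by omega)
        rw [hX1, hX2]
        have e1 : Finset.Ioc (c0 + c) L = ∅ := Finset.Ioc_eq_empty (by omega)
        rw [e1, Finset.sum_empty]
        rw [pvLower M c v (pvRun cnt vs) c0 L (by omega) (by omega)]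
        rw [hmid]
        by_cases hdvd : c0 / M < L / M
        · rw [if_pos (by omega)]
          have hle : c0 / M ≤ L / M := by omega
          push_cast [Nat.cast_sub hle]
          ring
        · rw [if_neg (by omega)]
          have : L / M - c0 / M = 0 := by omega
          rw [this]
          push_cast
          ring

lemma bside (k m : Int) (score : List Int) (M : Nat) (hM : 0 < M) (hMm : (M : Int) = m)
    (hMn : M ≤ score.length) :
    solution_alt k m score
      = ∑ j ∈ Finset.range (score.length / M),
          (pvRun (fun v => score.count v) (PySem.List.sorted (PySem.Set.ofList score) (fun v => v) true)).getD
            ((j + 1) * M - 1) 0 * (M : Int) := by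
  have hm : 0 < m := by omega
  have hnneg : ¬ (m ≤ 0 ∨ m > (score.length : Int)) := by
    push_neg
    constructor
    · omega
    · rw [← hMm]; exact_mod_cast hMn
  unfold solution_alt
  rw [if_neg hnneg]
  dsimp only
  rw [PySem.Dict.foldl_insert_getD_add_one_eq_counter, PySem.Dict.keys_counter]
  rw [← hMm]
  set cnt : Int → Nat := fun v => score.count v with hcnt
  set vs := PySem.List.sorted (PySem.Set.ofList score) (fun v => v) true with hvs
  set n' := score.length with hn'
  set Bn := n' / M with hBn
  set L := Bn * M with hL
  have hfun : (fun (acc : Int × Int) v =>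
        let prev := acc.2
        let cum := prev + (PySem.Dict.counter score).getD v 0
        let hi := min cum (PySem.Int.floordiv (n' : Int) (M : Int) * (M : Int))
        let num := PySem.Int.floordiv hi (M : Int) - PySem.Int.floordiv prev (M : Int)
        (if 0 < num then acc.1 + v * num * (M : Int) else acc.1, cum)) = pvStep cnt M L := by
    funext acc v
    simp only [pvStep, PySem.Dict.getD_counter, PySem.Int.floordiv_natCast, hcnt, hL, hBn, hn']
    push_cast
    ring_nf
  rw [hfun]
  have h00 : ((0 : Int), (0 : Int)) = ((0 : Int), ((0 : Nat) : Int)) := by norm_num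
  rw [h00, pvRunWalk M L cnt vs 0 0]
  -- lengths
  have hnodup : vs.Nodup := by
    rw [(PySem.List.sorted_perm (PySem.Set.ofList score) (fun v => v) true).nodup_iff]
    exact PySem.Set.nodup_ofList score
  have hmem : ∀ x : Int, x ∈ vs ↔ x ∈ score := by
    intro x
    rw [(PySem.List.sorted_perm (PySem.Set.ofList score) (fun v => v) true).mem_iff]
    exact PySem.Set.mem_ofList score x
  have hperm : (pvRun cnt vs).Perm score := by
    rw [List.perm_iff_count]
    intro x
    unfold pvRun
    rw [pvRun_count cnt vs hnodup x]
    by_cases hx : x ∈ vs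
    · simp [hx, hcnt]
    · rw [if_neg hx]
      have : x ∉ score := fun h => hx ((hmem x).mpr h)
      simp [List.count_eq_zero.mpr this]
  have hlenD : (pvRun cnt vs).length = n' := by rw [hperm.length_eq]
  have hLle : L ≤ n' := Nat.div_mul_le_self n' M
  have hmin : min (0 + (pvRun cnt vs).length) L = L := by rw [hlenD]; omega
  rw [hmin, hL, pvImage Bn M hM, Finset.sum_image (by
    intro x _ y _ hxy
    have := Nat.eq_of_mul_eq_mul_right hM hxy
    omega)]
  simp only [Nat.sub_zero, zero_add]

lemma pvNodupSorted (score : List Int) :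
    (PySem.List.sorted (PySem.Set.ofList score) (fun v => v) true).Nodup := by
  rw [(PySem.List.sorted_perm (PySem.Set.ofList score) (fun v => v) true).nodup_iff]
  exact PySem.Set.nodup_ofList score

lemma pvPerm (score : List Int) :
    (pvRun (fun v => score.count v) (PySem.List.sorted (PySem.Set.ofList score) (fun v => v) true)).Perm score := by
  set vs := PySem.List.sorted (PySem.Set.ofList score) (fun v => v) true with hvs
  have hmem : ∀ x : Int, x ∈ vs ↔ x ∈ score := by
    intro x
    rw [hvs, (PySem.List.sorted_perm (PySem.Set.ofList score) (fun v => v) true).mem_iff]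
    exact PySem.Set.mem_ofList score x
  rw [List.perm_iff_count]
  intro x
  unfold pvRun
  rw [pvRun_count _ vs (pvNodupSorted score) x]
  by_cases hx : x ∈ vs
  · simp [hx]
  · rw [if_neg hx]
    have : x ∉ score := fun h => hx ((hmem x).mpr h)
    simp [List.count_eq_zero.mpr this]

lemma pvSorted (score : List Int) :
    PySem.List.sorted score (fun x => x)
      = (pvRun (fun v => score.count v) (PySem.List.sorted (PySem.Set.ofList score) (fun v => v) true)).reverse := by
  apply PySem.List.sorted_id_eq_of_perm_of_pairwise
  · exact (List.reverse_perm _).trans (pvPerm score)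
  · rw [List.pairwise_reverse]
    unfold pvRun
    apply pvRun_pairwise
    exact PySem.List.sorted_pairwise_rev (PySem.Set.ofList score) (fun v => v)

lemma aside (k m : Int) (score : List Int) (M : Nat) (hM : 0 < M) (hMm : (M : Int) = m)
    (hMn : M ≤ score.length) :
    solution k m score
      = ∑ j ∈ Finset.range (score.length / M),
          (PySem.List.sorted score (fun x => x)).getD (score.length % M + j * M) 0 * (M : Int) := by
  have hmn' : ¬ m > (score.length : Int) := by
    rw [← hMm]
    exact not_lt.mpr (by exact_mod_cast hMn)
  unfold solution
  rw [if_neg hmn']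
  dsimp only
  rw [← hMm]
  set t := PySem.List.sorted score (fun x => x) with ht
  have hlen1 : t.length = score.length := (PySem.List.sorted_perm score (fun x => x) false).length_eq
  set n' := score.length with hn'
  set Bn := n' / M with hBn
  set r := n' % M with hr
  rw [hlen1, PySem.Int.mod_natCast, PySem.List.slice_from t (by positivity), Int.toNat_natCast]
  have hlen2 : (List.drop r t).length = n' - r := by simp [hlen1]
  rw [hlen2]
  have hdm : M * Bn + r = n' := by rw [hBn, hr]; exact Nat.div_add_mod n' M
  have hnr : n' - r = M * Bn := by omega
  rw [hnr]
  rw [PySem.List.pyRange_of_pos 0 ((M * Bn : Nat) : Int) (show (0:Int) < (M:Int) by exact_mod_cast hM)]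
  have hB1 : 1 ≤ Bn := (Nat.one_le_div_iff hM).mpr hMn
  have hpos : (0:Int) < ((M * Bn : Nat) : Int) := by
    have : 0 < M * Bn := Nat.mul_pos hM (by omega)
    exact_mod_cast this
  rw [if_pos hpos]
  have hcnt : ((((M * Bn : Nat) : Int) - 0 + (M : Int) - 1) / (M : Int)).toNat = Bn := by
    have h1 : (((M * Bn : Nat) : Int) - 0 + (M : Int) - 1) = ((M * Bn + M - 1 : Nat) : Int) := by
      omega
    rw [h1, ← Int.natCast_ediv, Int.toNat_natCast]
    rw [show M * Bn + M - 1 = M * Bn + (M - 1) by omega, Nat.mul_add_div hM,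
      Nat.div_eq_of_lt (by omega)]
    omega
  rw [hcnt]
  rw [List.foldl_map, PySem.List.foldl_add]
  have hbr : ((List.range Bn).map
      (fun (j : Nat) => PySem.List.pyGetD (List.drop r t) (0 + (M:Int) * (j:Int)) 0 * (M:Int))).sum
      = ∑ j ∈ Finset.range Bn,
          PySem.List.pyGetD (List.drop r t) (0 + (M:Int) * (j:Int)) 0 * (M:Int) := rfl
  rw [hbr, zero_add]
  refine Finset.sum_congr rfl ?_
  intro j hj
  rw [zero_add, PySem.List.pyGetD_of_nonneg _ _ (by positivity), ← Nat.cast_mul, Int.toNat_natCast]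
  rw [List.getD_eq_getElem?_getD, List.getElem?_drop, ← List.getD_eq_getElem?_getD, Nat.mul_comm M j]

lemma mainpos (k m : Int) (score : List Int) (M : Nat) (hM : 0 < M) (hMm : (M : Int) = m)
    (hMn : M ≤ score.length) : solution k m score = solution_alt k m score := by
  rw [aside k m score M hM hMm hMn, bside k m score M hM hMm hMn]
  set n' := score.length with hn'
  set Bn := n' / M with hBn
  set r := n' % M with hr
  set D := pvRun (fun v => score.count v)
      (PySem.List.sorted (PySem.Set.ofList score) (fun v => v) true) with hD
  have hlenD : D.length = n' := (pvPerm score).length_eq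
  have hdm : M * Bn + r = n' := by rw [hBn, hr]; exact Nat.div_add_mod n' M
  have hB1 : 1 ≤ Bn := (Nat.one_le_div_iff hM).mpr hMn
  rw [pvSorted score, ← hD]
  rw [← Finset.sum_range_reflect (fun j => D.getD ((j + 1) * M - 1) 0 * (M : Int)) Bn]
  refine Finset.sum_congr rfl ?_
  intro j hj
  rw [Finset.mem_range] at hj
  have h1 : Bn - 1 - j + 1 = Bn - j := by omega
  rw [h1]
  have h2 : (j + 1) * M = j * M + M := Nat.succ_mul j M
  have hjm : j * M + M ≤ Bn * M := by
    have h3 : (j + 1) * M ≤ Bn * M := Nat.mul_le_mul_right M (by omega)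
    omega
  have hcomm : M * Bn = Bn * M := Nat.mul_comm M Bn
  have hidx : r + j * M < D.length := by rw [hlenD]; omega
  rw [List.getD_eq_getElem?_getD, List.getElem?_reverse hidx, ← List.getD_eq_getElem?_getD]
  have hsm : (Bn - j) * M = Bn * M - j * M := Nat.sub_mul Bn j M
  have hix : D.length - 1 - (r + j * M) = (Bn - j) * M - 1 := by omega
  rw [hix]

-- ===== VERDICT (by name: the statements are the Claim_ definitions above) =====
theorem solution_spec : Claim_equal_solution := by
  intro k m score _ hpre
  unfold Spec_solution
  rcases lt_trichotomy m 0 with hm | hm | hm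
  · have hlen : (0 : Int) ≤ (score.length : Int) := by positivity
    have hA : solution k m score = 0 := by
      unfold solution
      rw [if_neg (by omega)]
      dsimp only
      have hpr : PySem.List.pyRange 0
          (((PySem.List.slice (PySem.List.sorted score (fun x => x))
            (some (PySem.Int.mod ((PySem.List.sorted score (fun x => x)).length : Int) m))).length : Int)) m
          = [] := by
        simp [PySem.List.pyRange, hm.ne, not_lt.mpr hm.le]
      rw [hpr]
      simp
    have hB : solution_alt k m score = 0 := by
      unfold solution_alt
      dsimp only
      rw [if_pos (Or.inl hm.le)]
    rw [hA, hB]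
  · exact absurd hm hpre
  · by_cases hmn : m > (score.length : Int)
    · unfold solution solution_alt
      dsimp only
      rw [if_pos hmn, if_pos (Or.inr hmn)]
    · exact mainpos k m score m.toNat (by omega) (Int.toNat_of_nonneg hm.le) (by omega)
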